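-- pv_equiv track=rewrite | github.com/nvaranki/multiply-table | Train.py | generate
-- ===== SOURCE A (Python) =====
-- from typing import List, Union
--
-- def generate(r1: tuple, r2: tuple, op: List[str] = " * ", eq: List[str] = " = ") -> List[str]:
--     rl = list()
--     # TODO "six times two equals twelve"
--     for o in op:
--         for e in eq:
--             for a in range(r1[0],r1[1]+1):
--                 for b in range(r2[0],r2[1]+1):
--                     rl.append( str(a) + o + str(b) + e + str(a*b) )
--     return rl
-- ===== SOURCE B (Python) =====
-- def generate(r1, r2, op=" * ", eq=" = "):
--     # Single flat loop: decode each output index k into (i, j, ia, ib) by divmod.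
--     na = r1[1] - r1[0] + 1
--     nb = r2[1] - r2[0] + 1
--     na = na if na > 0 else 0
--     nb = nb if nb > 0 else 0
--     ne = len(eq)
--     total = len(op) * ne * na * nb
--     rl = []
--     for k in range(total):
--         q, ib = divmod(k, nb)
--         q, ia = divmod(q, na)
--         i, j = divmod(q, ne)
--         a = r1[0] + ia
--         b = r2[0] + ib
--         rl.append(str(a) + op[i] + str(b) + eq[j] + str(a * b))
--     return rl
-- ===== Notes on version B (the rewrite author's own statement) =====
-- stated objective: alternative
-- what changed: B replaces A's four nested loops by one flat loop over range(total) that decodes each output position k into (op-index, eq-index, a-offset, b-offset) with three divmods, an index-arithmetic (mixed-radix) formulation of the cartesian product.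
import Mathlib
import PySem

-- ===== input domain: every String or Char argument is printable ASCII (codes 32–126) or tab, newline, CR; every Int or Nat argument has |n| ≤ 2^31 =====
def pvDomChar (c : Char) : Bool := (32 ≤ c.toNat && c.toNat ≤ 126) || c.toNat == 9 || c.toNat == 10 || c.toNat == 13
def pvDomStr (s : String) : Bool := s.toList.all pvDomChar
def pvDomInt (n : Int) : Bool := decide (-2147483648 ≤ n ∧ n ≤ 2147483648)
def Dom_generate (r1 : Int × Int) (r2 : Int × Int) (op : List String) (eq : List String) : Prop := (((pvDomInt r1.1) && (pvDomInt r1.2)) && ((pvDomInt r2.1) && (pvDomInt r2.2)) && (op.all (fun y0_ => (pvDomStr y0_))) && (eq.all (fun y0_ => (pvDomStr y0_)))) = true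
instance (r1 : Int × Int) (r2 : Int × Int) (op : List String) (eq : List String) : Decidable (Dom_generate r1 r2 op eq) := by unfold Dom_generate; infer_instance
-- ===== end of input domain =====

-- B replaces A's four nested loops by one flat loop over the total output count,
-- decoding each position k into (op-index, eq-index, a-offset, b-offset) by divmod (objective: alternative).

-- ===== PORT A =====
def generate (r1 : Int × Int) (r2 : Int × Int) (op : List String) (eq : List String) : List String :=
  op.foldl (fun rl o =>
    eq.foldl (fun rl e =>
      (PySem.List.pyRange r1.1 (r1.2 + 1) 1).foldl (fun rl a =>
        (PySem.List.pyRange r2.1 (r2.2 + 1) 1).foldl (fun rl b =>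
          rl ++ [PySem.Int.toStr a ++ o ++ PySem.Int.toStr b ++ e ++ PySem.Int.toStr (a * b)]) rl) rl) rl) []

-- ===== PORT B =====
-- flat loop over range(total); op[i] / eq[j] are ported as pyGetD (total form of xs[i]; the
-- decoded indices are always in range when the loop body runs)
def generate_alt (r1 : Int × Int) (r2 : Int × Int) (op : List String) (eq : List String) : List String :=
  let na0 : Int := r1.2 - r1.1 + 1
  let nb0 : Int := r2.2 - r2.1 + 1
  let na : Int := if na0 > 0 then na0 else 0
  let nb : Int := if nb0 > 0 then nb0 else 0
  let ne : Int := (eq.length : Int)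
  let total : Int := (op.length : Int) * ne * na * nb
  (PySem.List.pyRange 0 total 1).foldl (fun rl k =>
    let ib := PySem.Int.mod k nb
    let q  := PySem.Int.floordiv k nb
    let ia := PySem.Int.mod q na
    let q2 := PySem.Int.floordiv q na
    let j  := PySem.Int.mod q2 ne
    let i  := PySem.Int.floordiv q2 ne
    let a := r1.1 + ia
    let b := r2.1 + ib
    rl ++ [PySem.Int.toStr a ++ PySem.List.pyGetD op i "" ++ PySem.Int.toStr b ++
           PySem.List.pyGetD eq j "" ++ PySem.Int.toStr (a * b)]) []

-- ===== PRECONDITION & SPEC =====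
def Spec_generate (r1 : Int × Int) (r2 : Int × Int) (op : List String) (eq : List String) (out : List String) : Prop := out = generate_alt r1 r2 op eq
instance (r1 : Int × Int) (r2 : Int × Int) (op : List String) (eq : List String) (out : List String) : Decidable (Spec_generate r1 r2 op eq out) := by unfold Spec_generate; infer_instance

-- ===== CLAIM (what is proved, stated in full; the proofs are below) =====
def Claim_equal_generate : Prop := ∀ (r1 : Int × Int) (r2 : Int × Int) (op : List String) (eq : List String), Dom_generate r1 r2 op eq → Spec_generate r1 r2 op eq (generate r1 r2 op eq)

-- ===== LEMMAS AND PROOFS =====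

-- mixed-radix decode arithmetic (specific combination of bounds used by B's divmod chain)
theorem dec_mod (a b c : Int) (h0 : 0 ≤ c) (hc : c < b) : (a * b + c) % b = c := by
  rw [mul_comm, add_comm, Int.add_mul_emod_self_left, Int.emod_eq_of_lt h0 hc]

theorem dec_div (a b c : Int) (h0 : 0 ≤ c) (hc : c < b) : (a * b + c) / b = a := by
  rw [mul_comm, add_comm, Int.add_mul_ediv_left _ _ (by omega : b ≠ 0),
    Int.ediv_eq_zero_of_lt h0 hc, zero_add]

-- a shifted range is the zero-based range mapped by the shift
theorem pyRange_zero_shift {α : Type} (a n : Int) (f : Int → α) :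
    (PySem.List.pyRange a (a + n) 1).map f = (PySem.List.pyRange 0 n 1).map (fun k => f (a + k)) := by
  simp [PySem.List.pyRange_one, List.map_map, Function.comp_def]

-- clamping the upper bound at 0 does not change a zero-based range
theorem pyRange_clamp (n : Int) : PySem.List.pyRange 0 (if n > 0 then n else 0) 1 = PySem.List.pyRange 0 n 1 := by
  split_ifs with h
  · rfl
  · rw [PySem.List.pyRange_one_eq_nil (by omega), PySem.List.pyRange_one_eq_nil (by omega)]

-- splitting a flat range of m*n positions into m blocks of n
theorem split_range {α : Type} (m n : Int) (hm : 0 ≤ m) (hn : 0 ≤ n) (f : Int → α) :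
    (PySem.List.pyRange 0 (m * n) 1).map f
      = (PySem.List.pyRange 0 m 1).flatMap (fun i => (PySem.List.pyRange 0 n 1).map (fun j => f (i * n + j))) := by
  obtain ⟨M, rfl⟩ : ∃ M : Nat, m = (M : Int) := ⟨m.toNat, (Int.toNat_of_nonneg hm).symm⟩
  induction M with
  | zero => simp [PySem.List.pyRange_one_eq_nil]
  | succ M ih =>
    have hM : ((M + 1 : Nat) : Int) = (M : Int) + 1 := by push_cast; ring
    have h1 : ((M + 1 : Nat) : Int) * n = (M : Int) * n + n := by push_cast; ring
    rw [h1, hM, PySem.List.pyRange_one_append 0 ((M : Int) * n) ((M : Int) * n + n)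
        (by positivity) (by omega),
      PySem.List.pyRange_one_succ_right (by positivity)]
    rw [List.map_append, List.flatMap_append, ih (by positivity)]
    congr 1
    rw [pyRange_zero_shift]
    simp

-- ===== VERDICT (by name: the statement is the Claim_ definition above) =====
theorem generate_spec : Claim_equal_generate := by
  intro r1 r2 op eq _
  unfold Spec_generate generate generate_alt
  -- names for the counts
  set na : Int := if r1.2 - r1.1 + 1 > 0 then r1.2 - r1.1 + 1 else 0 with hna
  set nb : Int := if r2.2 - r2.1 + 1 > 0 then r2.2 - r2.1 + 1 else 0 with hnb
  have hna0 : 0 ≤ na := by rw [hna]; split_ifs <;> omega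
  have hnb0 : 0 ≤ nb := by rw [hnb]; split_ifs <;> omega
  -- A's loops as flatMaps
  simp only [PySem.List.foldl_append_singleton_eq_map, PySem.List.foldl_append_eq_flatMap,
    List.nil_append]
  -- A's ranges as zero-based clamped ranges
  have hr1 : PySem.List.pyRange r1.1 (r1.2 + 1) 1
      = (PySem.List.pyRange 0 na 1).map (fun k => r1.1 + k) := by
    have : r1.2 + 1 = r1.1 + (r1.2 - r1.1 + 1) := by ring
    rw [this, ← List.map_id (PySem.List.pyRange r1.1 _ 1), pyRange_zero_shift, hna, pyRange_clamp]
    simp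
  have hr2 : PySem.List.pyRange r2.1 (r2.2 + 1) 1
      = (PySem.List.pyRange 0 nb 1).map (fun k => r2.1 + k) := by
    have : r2.2 + 1 = r2.1 + (r2.2 - r2.1 + 1) := by ring
    rw [this, ← List.map_id (PySem.List.pyRange r2.1 _ 1), pyRange_zero_shift, hnb, pyRange_clamp]
    simp
  -- A's list loops as index loops
  have hop : op = (PySem.List.pyRange 0 (op.length : Int) 1).map (fun i => PySem.List.pyGetD op i "") :=
    (PySem.List.map_pyGetD_pyRange_zero op "").symm
  have heq : eq = (PySem.List.pyRange 0 (eq.length : Int) 1).map (fun j => PySem.List.pyGetD eq j "") :=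
    (PySem.List.map_pyGetD_pyRange_zero eq "").symm
  conv_lhs => rw [hop, heq, hr1, hr2]
  simp only [List.flatMap_map, List.map_map, Function.comp_def]
  -- B's flat loop split into four levels
  rw [← hna, ← hnb]
  rw [show ((op.length : Int) * (eq.length : Int) * na) * nb
      = (op.length : Int) * ((eq.length : Int) * (na * nb)) from by ring]
  rw [split_range _ ((eq.length : Int) * (na * nb)) (by positivity) (by positivity)]
  refine List.flatMap_congr (fun i hi => ?_)
  obtain ⟨hi0, hiL⟩ := (PySem.List.mem_pyRange_one).1 hi
  rw [split_range _ (na * nb) (by positivity) (by positivity)]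
  refine List.flatMap_congr (fun j hj => ?_)
  obtain ⟨hj0, hjE⟩ := (PySem.List.mem_pyRange_one).1 hj
  rw [split_range na nb hna0 hnb0]
  refine List.flatMap_congr (fun ia hia => ?_)
  obtain ⟨hia0, hiaN⟩ := (PySem.List.mem_pyRange_one).1 hia
  refine List.map_congr_left (fun ib hib => ?_)
  obtain ⟨hib0, hibN⟩ := (PySem.List.mem_pyRange_one).1 hib
  -- decode the flat index
  have hNB : 0 < nb := by omega
  have hNA : 0 < na := by omega
  have hE : 0 < (eq.length : Int) := by omega
  have hk : i * ((eq.length : Int) * (na * nb)) + (j * (na * nb) + (ia * nb + ib))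
      = ((i * (eq.length : Int) + j) * na + ia) * nb + ib := by ring
  simp only [hk, PySem.Int.floordiv_eq_ediv_of_pos hNB, PySem.Int.mod_eq_emod_of_pos hNB,
    dec_mod _ _ _ hib0 hibN, dec_div _ _ _ hib0 hibN]
  simp only [PySem.Int.floordiv_eq_ediv_of_pos hNA, PySem.Int.mod_eq_emod_of_pos hNA,
    dec_mod _ _ _ hia0 hiaN, dec_div _ _ _ hia0 hiaN]
  simp only [PySem.Int.floordiv_eq_ediv_of_pos hE, PySem.Int.mod_eq_emod_of_pos hE,
    dec_mod _ _ _ hj0 hjE, dec_div _ _ _ hj0 hjE]
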